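-- pv_equiv track=rewrite | github.com/manikazad/parse_web_blocks | scrapper.py | partition_tag_sequence
-- ===== SOURCE A (Python) =====
-- from copy import deepcopy
--
-- def partition_tag_sequence(seq, seq_index):
--     partitions = []
--     new_part = []
--     first = True
--     for elem, index in seq_index.items():
--         if first:
--             new_part.append(elem)
--             prev = index
--             first = False
--         else:
--             if min(index) > max(prev):
--                 partitions.append(deepcopy(new_part))
--                 new_part = [elem]
--
--             else:
--                 new_part.append(elem)
--             prev = index
--
--     seq_parts = []
--     for part in partitions:
--         seq_part = []
--         for ind in part:
--             seq_part.extend(seq_index[ind])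
--         seq_parts.append((min(seq_part), max(seq_part)))
--     seqs = [seq[i:j + 1] for i, j in seq_parts]
--     return (seqs)
-- ===== SOURCE B (Python) =====
-- def partition_tag_sequence(seq, seq_index):
--     result = []
--     group = None  # (gmin, gmax) of the current open group
--     prev_max = None  # max of the previous element's index list
--     for index in seq_index.values():
--         lo, hi = min(index), max(index)
--         if group is None:
--             group = (lo, hi)
--         elif lo > prev_max:
--             gmin, gmax = group
--             result.append(seq[gmin:gmax + 1])
--             group = (lo, hi)
--         else:
--             gmin, gmax = group
--             group = (min(gmin, lo), max(gmax, hi))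
--         prev_max = hi
--     return result
-- ===== Notes on version B (the rewrite author's own statement) =====
-- stated objective: simpler
-- what changed: B emits each slice in a single pass by keeping only the running (min,max) of the open group and the previous element's max, instead of A's two-phase scheme of collecting key partitions and then re-looking every key up in the dict to recompute each group's extrema.
-- outside the precondition, e.g. on partition_tag_sequence(['x'], {'a': []}): A returns [], B raises ValueError
import Mathlib
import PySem

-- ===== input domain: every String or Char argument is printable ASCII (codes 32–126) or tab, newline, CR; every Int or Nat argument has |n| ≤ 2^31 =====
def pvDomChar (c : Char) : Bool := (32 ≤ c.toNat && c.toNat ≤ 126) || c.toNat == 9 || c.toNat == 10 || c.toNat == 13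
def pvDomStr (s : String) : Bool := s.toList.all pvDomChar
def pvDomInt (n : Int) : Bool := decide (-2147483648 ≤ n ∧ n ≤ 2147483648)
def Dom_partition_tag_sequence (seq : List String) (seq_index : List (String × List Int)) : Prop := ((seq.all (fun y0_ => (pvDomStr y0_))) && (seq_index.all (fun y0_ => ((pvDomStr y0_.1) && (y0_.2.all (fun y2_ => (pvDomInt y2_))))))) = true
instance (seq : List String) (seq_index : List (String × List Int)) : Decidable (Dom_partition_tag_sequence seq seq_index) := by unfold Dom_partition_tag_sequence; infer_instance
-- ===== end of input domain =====

-- B replaces A's two-phase collect-keys-then-relookup scheme by a single pass that keeps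
-- only the running (min,max) of the open group; same return value on Pre_ (objective: simpler).

-- ===== PORT A =====
-- Python's min(l)/max(l) on a nonempty int list (the .getD 0 is unreachable under Pre_)
def pvMin (l : List Int) : Int := (PySem.List.min? l (fun x => x)).getD 0
def pvMax (l : List Int) : Int := (PySem.List.max? l (fun x => x)).getD 0
-- seq_index[ind]: first-match lookup in the association list (KeyError unreachable: keys come from seq_index itself)
def pvLookup (d : List (String × List Int)) (k : String) : List Int := ((d.find? (fun p => p.1 == k)).map (fun p => p.2)).getD []
-- A's inner loop: seq_part = []; for ind in part: seq_part.extend(seq_index[ind])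
def pvConcat (d : List (String × List Int)) (part : List String) : List Int := part.foldl (fun acc ind => acc ++ pvLookup d ind) []

def partition_tag_sequence (seq : List String) (seq_index : List (String × List Int)) : List (List String) :=
  -- first loop: state (partitions, new_part, first, prev)
  let st := seq_index.foldl
    (fun (st : List (List String) × List String × Bool × List Int) p =>
      if st.2.2.1 then (st.1, st.2.1 ++ [p.1], false, p.2)
      else if pvMin p.2 > pvMax st.2.2.2 then (st.1 ++ [st.2.1], [p.1], false, p.2)
      else (st.1, st.2.1 ++ [p.1], false, p.2))
    ([], [], true, [])
  -- second loop: per partition, (min, max) of the concatenated index lists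
  let seq_parts := st.1.map (fun part => (pvMin (pvConcat seq_index part), pvMax (pvConcat seq_index part)))
  -- seqs = [seq[i:j+1] for i, j in seq_parts]
  seq_parts.map (fun ij => PySem.List.slice seq (some ij.1) (some (ij.2 + 1)))

-- ===== PORT B =====
def partition_tag_sequence_alt (seq : List String) (seq_index : List (String × List Int)) : List (List String) :=
  -- single pass: state (result, open group's (gmin,gmax) or none, prev_max)
  (seq_index.foldl
    (fun (st : List (List String) × Option (Int × Int) × Int) p =>
      let lo := pvMin p.2
      let hi := pvMax p.2
      match st.2.1 with
      | none => (st.1, some (lo, hi), hi)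
      | some g =>
        if lo > st.2.2 then (st.1 ++ [PySem.List.slice seq (some g.1) (some (g.2 + 1))], some (lo, hi), hi)
        else (st.1, some (min g.1 lo, max g.2 hi), hi))
    ([], none, 0)).1

-- ===== PRECONDITION & SPEC =====
-- Pre_ excludes inputs with an empty index list (A raises ValueError in min()/max() on every such
-- input except a one-entry dict, where A's [] is unreachable for B, whose min() raises there too),
-- and association lists with duplicate keys, which a Python dict cannot represent.
def Pre_partition_tag_sequence (seq : List String) (seq_index : List (String × List Int)) : Prop :=
  (seq_index.map Prod.fst).Nodup ∧ ∀ p ∈ seq_index, p.2 ≠ []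
instance (seq : List String) (seq_index : List (String × List Int)) : Decidable (Pre_partition_tag_sequence seq seq_index) := by unfold Pre_partition_tag_sequence; infer_instance
def pvWitness_partition_tag_sequence : List String × (List (String × List Int)) :=
  (["x", "y", "z"], [("a", [0, 1]), ("b", [3])])
def Spec_partition_tag_sequence (seq : List String) (seq_index : List (String × List Int)) (out : List (List String)) : Prop := out = partition_tag_sequence_alt seq seq_index
instance (seq : List String) (seq_index : List (String × List Int)) (out : List (List String)) : Decidable (Spec_partition_tag_sequence seq seq_index out) := by unfold Spec_partition_tag_sequence; infer_instance

-- ===== CLAIM (what is proved, stated in full; the proofs are below) =====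
def Claim_equal_partition_tag_sequence : Prop := ∀ (seq : List String) (seq_index : List (String × List Int)), Dom_partition_tag_sequence seq seq_index → Pre_partition_tag_sequence seq seq_index → Spec_partition_tag_sequence seq seq_index (partition_tag_sequence seq seq_index)

-- ===== LEMMAS AND PROOFS =====

-- first-match lookup returns each pair's own value when keys are distinct
theorem pvLookup_self {d : List (String × List Int)} (hnd : (d.map Prod.fst).Nodup) :
    ∀ p ∈ d, pvLookup d p.1 = p.2 := by
  induction d with
  | nil => intro p hp; cases hp
  | cons q t ih =>
    intro p hp
    simp only [List.map_cons, List.nodup_cons] at hnd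
    cases hp with
    | head => simp [pvLookup]
    | tail _ hp =>
      have hne : ¬ (q.1 == p.1) = true := by
          simp only [beq_iff_eq]
          intro h; exact hnd.1 (h ▸ List.mem_map_of_mem hp)
      simpa [pvLookup, List.find?, hne] using ih hnd.2 p hp

theorem pvMin_append {l1 l2 : List Int} (h1 : l1 ≠ []) (h2 : l2 ≠ []) :
    pvMin (l1 ++ l2) = min (pvMin l1) (pvMin l2) := by
  obtain ⟨x, t1, rfl⟩ := List.exists_cons_of_ne_nil h1
  obtain ⟨y, t2, rfl⟩ := List.exists_cons_of_ne_nil h2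
  simp only [pvMin, List.cons_append, PySem.List.min?_id_cons, Option.getD_some,
    List.foldl_append, List.foldl_cons]
  rw [show min (List.foldl min x t1) y = min (List.foldl min x t1) y from rfl,
    ← List.foldl_assoc (op := min)]

theorem pvMax_append {l1 l2 : List Int} (h1 : l1 ≠ []) (h2 : l2 ≠ []) :
    pvMax (l1 ++ l2) = max (pvMax l1) (pvMax l2) := by
  obtain ⟨x, t1, rfl⟩ := List.exists_cons_of_ne_nil h1
  obtain ⟨y, t2, rfl⟩ := List.exists_cons_of_ne_nil h2
  simp only [pvMax, List.cons_append, PySem.List.max?_id_cons, Option.getD_some,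
    List.foldl_append, List.foldl_cons]
  rw [← List.foldl_assoc (op := max)]

theorem pvConcat_append_singleton (d : List (String × List Int)) (part : List String) (e : String) :
    pvConcat d (part ++ [e]) = pvConcat d part ++ pvLookup d e := by
  simp [pvConcat, List.foldl_append]

-- the slice A finally builds for one closed partition
def pvSliceOf (seq : List String) (d : List (String × List Int)) (part : List String) : List String :=
  PySem.List.slice seq (some (pvMin (pvConcat d part))) (some (pvMax (pvConcat d part) + 1))

-- main loop invariant: B's accumulated result is A's partitions mapped through pvSliceOf
theorem pv_loop (seq : List String) (seq_index : List (String × List Int)) :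
    ∀ (rest : List (String × List Int)) (partitions : List (List String)) (new_part : List String)
      (prev : List Int),
      (∀ p ∈ rest, pvLookup seq_index p.1 = p.2) →
      (∀ p ∈ rest, p.2 ≠ []) →
      pvConcat seq_index new_part ≠ [] →
      (rest.foldl
        (fun (st : List (List String) × Option (Int × Int) × Int) p =>
          let lo := pvMin p.2
          let hi := pvMax p.2
          match st.2.1 with
          | none => (st.1, some (lo, hi), hi)
          | some g =>
            if lo > st.2.2 then (st.1 ++ [PySem.List.slice seq (some g.1) (some (g.2 + 1))], some (lo, hi), hi)
            else (st.1, some (min g.1 lo, max g.2 hi), hi))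
        (partitions.map (pvSliceOf seq seq_index),
          some (pvMin (pvConcat seq_index new_part), pvMax (pvConcat seq_index new_part)),
          pvMax prev)).1
      =
      ((rest.foldl
        (fun (st : List (List String) × List String × Bool × List Int) p =>
          if st.2.2.1 then (st.1, st.2.1 ++ [p.1], false, p.2)
          else if pvMin p.2 > pvMax st.2.2.2 then (st.1 ++ [st.2.1], [p.1], false, p.2)
          else (st.1, st.2.1 ++ [p.1], false, p.2))
        (partitions, new_part, false, prev)).1).map (pvSliceOf seq seq_index) := by
  intro rest
  induction rest with
  | nil => intro partitions new_part prev _ _ _; simp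
  | cons p t ih =>
    intro partitions new_part prev hk hne hce
    have hkp : pvLookup seq_index p.1 = p.2 := hk p (List.mem_cons_self ..)
    have hnep : p.2 ≠ [] := hne p (List.mem_cons_self ..)
    simp only [List.foldl_cons, Bool.false_eq_true, if_false]
    by_cases hguard : pvMin p.2 > pvMax prev
    · simp only [if_pos hguard]
      have hc : pvConcat seq_index [p.1] = p.2 := by simp [pvConcat, hkp]
      have := ih (partitions ++ [new_part]) [p.1] p.2
        (fun q hq => hk q (List.mem_cons_of_mem _ hq))
        (fun q hq => hne q (List.mem_cons_of_mem _ hq))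
        (by rw [hc]; exact hnep)
      simp only [hc, List.map_append, List.map_cons, List.map_nil] at this
      simpa [pvSliceOf] using this
    · simp only [if_neg hguard]
      have hc : pvConcat seq_index (new_part ++ [p.1]) = pvConcat seq_index new_part ++ p.2 := by
        rw [pvConcat_append_singleton, hkp]
      have hmin : pvMin (pvConcat seq_index (new_part ++ [p.1]))
          = min (pvMin (pvConcat seq_index new_part)) (pvMin p.2) := by
        rw [hc]; exact pvMin_append hce hnep
      have hmax : pvMax (pvConcat seq_index (new_part ++ [p.1]))
          = max (pvMax (pvConcat seq_index new_part)) (pvMax p.2) := by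
        rw [hc]; exact pvMax_append hce hnep
      have := ih partitions (new_part ++ [p.1]) p.2
        (fun q hq => hk q (List.mem_cons_of_mem _ hq))
        (fun q hq => hne q (List.mem_cons_of_mem _ hq))
        (by simp [hc, hnep])
      rw [hmin, hmax] at this
      exact this

-- ===== VERDICT (by name: the statement is the Claim_ definition above) =====
theorem partition_tag_sequence_spec : Claim_equal_partition_tag_sequence := by
  intro seq seq_index _ hpre
  obtain ⟨hnd, hne⟩ := hpre
  unfold Spec_partition_tag_sequence partition_tag_sequence partition_tag_sequence_alt
  cases seq_index with
  | nil => simp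
  | cons p t =>
    have hk : ∀ q ∈ p :: t, pvLookup (p :: t) q.1 = q.2 := pvLookup_self hnd
    have hkp : pvLookup (p :: t) p.1 = p.2 := hk p (List.mem_cons_self ..)
    have hc : pvConcat (p :: t) [p.1] = p.2 := by simp [pvConcat, hkp]
    have := pv_loop seq (p :: t) t [] [p.1] p.2
      (fun q hq => hk q (List.mem_cons_of_mem _ hq))
      (fun q hq => hne q (List.mem_cons_of_mem _ hq))
      (by rw [hc]; exact hne p (List.mem_cons_self ..))
    simp only [List.foldl_cons, if_true, List.nil_append, List.map_nil, hc] at this ⊢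
    rw [List.map_map, this]
    simp [pvSliceOf, Function.comp]
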